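-- pv_equiv track=rewrite | github.com/ymtz13/CompetitiveProgramming | AtCoder/ABC114/C.py | f
-- ===== SOURCE A (Python) =====
-- def f(N, D, b=False):
--     if len(N)==0: return 0 if b else 1
--
--     n0 = int(N[0])
--     m = 0
--     for d in D:
--         if d==n0:
--             m += f(N[1:], D)
--         if d<n0:
--             m += len(D)**len(N[1:])
--     return m + f('9'*len(N[1:]), D, True) if b else m
-- ===== SOURCE B (Python) =====
-- def f(N, D, b=False):
--     # Iterative digit DP (single right-to-left pass) instead of A's branching recursion.
--     k = len(D)
--     t = 1   # tight count for the processed suffix (empty suffix: exactly-equal -> 1)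
--     p = 1   # k ** (length of processed suffix)
--     for ch in reversed(N):
--         n = int(ch)
--         lt = sum(1 for d in D if d < n)
--         eqc = sum(1 for d in D if d == n)
--         t = lt * p + eqc * t
--         p *= k
--     if not b:
--         return t
--     L = len(N)
--     if L == 0:
--         return 0
--     # add counts for all shorter lengths: t9_l = tight count of '9'*l
--     a = sum(1 for d in D if d < 9)
--     e = sum(1 for d in D if d == 9)
--     total = t
--     t9 = 1
--     for l in range(1, L):
--         t9 = a * k ** (l - 1) + e * t9
--         total += t9
--     return total
-- ===== Notes on version B (the rewrite author's own statement) =====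
-- stated objective: faster
-- what changed: Replaced A's branching recursion (which re-invokes f once per matching digit in D and once more per shorter length via f('9'*l, D, True)) with a single right-to-left iterative digit-DP pass plus a short forward loop for the shorter lengths; Pre_ excludes strings with a non-digit character, where int() raises in A unless A's lazy recursion happens never to reach that character.
-- outside the precondition, e.g. on f('0x1', [], True): A returns 0, B raises ValueError; on f('7x', [3], False): A returns 1, B raises ValueError
import Mathlib
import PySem

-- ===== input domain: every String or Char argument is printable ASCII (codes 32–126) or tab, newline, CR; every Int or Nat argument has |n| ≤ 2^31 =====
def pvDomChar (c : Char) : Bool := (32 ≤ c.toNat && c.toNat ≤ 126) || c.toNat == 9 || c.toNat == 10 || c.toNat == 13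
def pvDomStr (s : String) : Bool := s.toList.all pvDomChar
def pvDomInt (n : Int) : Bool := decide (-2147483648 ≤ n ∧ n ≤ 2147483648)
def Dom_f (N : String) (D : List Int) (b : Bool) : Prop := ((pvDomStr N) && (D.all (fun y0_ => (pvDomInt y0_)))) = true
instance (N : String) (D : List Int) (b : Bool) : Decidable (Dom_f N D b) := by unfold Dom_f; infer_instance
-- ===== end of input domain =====

-- B replaces A's branching recursion (which re-calls f once per matching digit and once
-- per shorter length) by a single right-to-left iterative digit-DP pass; objective: faster.

-- int(ch) for a single character ch; `getD 0` is only reached outside Pre_f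
-- (Python raises ValueError there), where nothing is claimed.
def nval (c : Char) : Int := (PySem.Int.ofChars? [c]).getD 0

-- ===== PORT A =====
-- literal transliteration of A; the recursive call f(N[1:], D) is hoisted out of the
-- `for d in D` loop (Python re-evaluates the identical call each matching d — same value).
def fA (N : List Char) (D : List Int) (b : Bool) : Int :=
  match N with
  | [] => if b then 0 else 1
  | c :: rest =>
    let n0 : Int := nval c
    let frec : Int := fA rest D false
    let m : Int := D.foldl (fun m d =>
      let m := if d = n0 then m + frec else m
      if d < n0 then m + (PySem.List.len D) ^ rest.length else m) 0
    if b then m + fA (List.replicate rest.length '9') D true else m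
termination_by N.length
decreasing_by all_goals simp

def f (N : String) (D : List Int) (b : Bool) : Int := fA N.toList D b

-- ===== PORT B =====
def f_alt (N : String) (D : List Int) (b : Bool) : Int :=
  let k : Int := PySem.List.len D
  let tp : Int × Int := N.toList.reverse.foldl (fun (tp : Int × Int) ch =>
      let n : Int := nval ch
      let lt : Int := (D.countP (fun d => d < n) : Int)
      let eqc : Int := (D.countP (fun d => d = n) : Int)
      (lt * tp.2 + eqc * tp.1, tp.2 * k)) (1, 1)
  let t := tp.1
  if !b then t
  else
    let L := N.toList.length
    if L = 0 then 0
    else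
      let a : Int := (D.countP (fun d => d < 9) : Int)
      let e : Int := (D.countP (fun d => d = 9) : Int)
      ((PySem.List.pyRange 1 (L : Int) 1).foldl (fun (st : Int × Int) l =>
          let t9 := a * k ^ (l - 1).toNat + e * st.2
          (st.1 + t9, t9)) (t, 1)).1

-- ===== PRECONDITION & SPEC =====
-- Pre_f excludes strings containing a non-digit character: there Python's int() raises
-- ValueError in A unless A's lazy recursion happens never to reach that character (e.g.
-- D = [] stops before position 1), and B's single full pass raises; digit-only N is the
-- function's natural domain.
def Pre_f (N : String) (D : List Int) (b : Bool) : Prop :=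
  N.toList.all (fun c => decide ('0' ≤ c) && decide (c ≤ '9')) = true
instance (N : String) (D : List Int) (b : Bool) : Decidable (Pre_f N D b) := by
  unfold Pre_f; infer_instance
def pvWitness_f : String × List Int × Bool := ("30", [1, 4, 9], true)

def Spec_f (N : String) (D : List Int) (b : Bool) (out : Int) : Prop := out = f_alt N D b
instance (N : String) (D : List Int) (b : Bool) (out : Int) : Decidable (Spec_f N D b out) := by unfold Spec_f; infer_instance

-- ===== CLAIM (what is proved, stated in full; the proofs are below) =====
def Claim_equal_f : Prop := ∀ (N : String) (D : List Int) (b : Bool), Dom_f N D b → Pre_f N D b → Spec_f N D b (f N D b)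

-- ===== LEMMAS AND PROOFS =====

-- the common mathematical value: tight count of length-|N| digit strings over D that are ≤ N
def tight (D : List Int) : List Char → Int
  | [] => 1
  | c :: cs =>
      (D.countP (fun d => d < nval c) : Int) * (D.length : Int) ^ cs.length
      + (D.countP (fun d => d = nval c) : Int) * tight D cs

-- sum of tight counts of '9'-strings of lengths 1..l
def shortSum (D : List Int) : Nat → Int
  | 0 => 0
  | l + 1 => shortSum D l + tight D (List.replicate (l + 1) '9')

theorem foldA_eq (l : List Int) (n0 X Y : Int) (acc : Int) :
    l.foldl (fun m d =>
      let m := if d = n0 then m + X else m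
      if d < n0 then m + Y else m) acc
    = acc + (l.countP (fun d => d = n0) : Int) * X + (l.countP (fun d => d < n0) : Int) * Y := by
  induction l generalizing acc with
  | nil => simp
  | cons d tl ih =>
    simp only [List.foldl_cons, List.countP_cons, ih]
    by_cases h1 : d = n0 <;> by_cases h2 : d < n0 <;>
      simp only [h1, h2, decide_true, decide_false, if_false, decide_eq_true_eq, if_pos,
        Nat.cast_add, Nat.cast_one] <;>
      simp [h1, h2] <;> ring

theorem fA_false_eq (N : List Char) (D : List Int) :
    fA N D false = tight D N := by
  induction N with
  | nil => simp [fA, tight]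
  | cons c cs ih =>
    rw [fA]
    simp only [foldA_eq, ih, tight, PySem.List.len_eq, Bool.false_eq_true, if_false]
    ring

theorem fA_true_eq (N : List Char) (D : List Int) (h : N ≠ []) :
    fA N D true = tight D N + fA (List.replicate (N.length - 1) '9') D true := by
  match N with
  | c :: cs =>
    rw [fA]
    simp only [foldA_eq, fA_false_eq, PySem.List.len_eq, List.length_cons,
      Nat.add_sub_cancel]
    simp [tight]; ring

theorem fA_nines (D : List Int) (l : Nat) :
    fA (List.replicate l '9') D true = shortSum D l := by
  induction l with
  | zero => simp [fA, shortSum]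
  | succ n ih =>
    rw [fA_true_eq _ _ (by simp)]
    simp only [List.length_replicate, Nat.add_sub_cancel, ih, shortSum]
    ring

theorem tight_replicate_succ (D : List Int) (l : Nat) :
    tight D (List.replicate (l + 1) '9')
    = (D.countP (fun d => d < 9) : Int) * (D.length : Int) ^ l
      + (D.countP (fun d => d = 9) : Int) * tight D (List.replicate l '9') := by
  have h9 : nval '9' = 9 := by decide
  rw [List.replicate_succ, tight, h9, List.length_replicate]

theorem foldB_rev (N : List Char) (D : List Int) :
    N.reverse.foldl (fun (tp : Int × Int) ch =>
      ((D.countP (fun d => d < nval ch) : Int) * tp.2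
        + (D.countP (fun d => d = nval ch) : Int) * tp.1,
       tp.2 * (D.length : Int))) (1, 1)
    = (tight D N, (D.length : Int) ^ N.length) := by
  induction N with
  | nil => simp [tight]
  | cons c cs ih =>
    rw [List.reverse_cons, List.foldl_append, ih]
    simp [tight, pow_succ]

theorem foldB_range (D : List Int) (t0 : Int) (L : Nat) :
    ((PySem.List.pyRange 1 ((L + 1 : Nat) : Int) 1).foldl (fun (st : Int × Int) l =>
        let t9 := (D.countP (fun d => d < 9) : Int) * (D.length : Int) ^ (l - 1).toNat
          + (D.countP (fun d => d = 9) : Int) * st.2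
        (st.1 + t9, t9)) (t0, 1))
    = (t0 + shortSum D L, tight D (List.replicate L '9')) := by
  induction L with
  | zero =>
    have : PySem.List.pyRange 1 (1 : Int) 1 = [] := by decide
    simp [this, shortSum, tight]
  | succ n ih =>
    have hone : PySem.List.pyRange ((n + 1 : Nat) : Int) ((n + 2 : Nat) : Int) 1
        = [((n + 1 : Nat) : Int)] := by
      rw [PySem.List.pyRange_one_cons (by push_cast; omega),
        PySem.List.pyRange_one_eq_nil (by push_cast; omega)]
    have hstep : PySem.List.pyRange 1 ((n + 2 : Nat) : Int) 1
        = PySem.List.pyRange 1 ((n + 1 : Nat) : Int) 1 ++ [((n + 1 : Nat) : Int)] := by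
      rw [PySem.List.pyRange_one_append 1 ((n + 1 : Nat) : Int) ((n + 2 : Nat) : Int)
        (by push_cast; omega) (by push_cast; omega), hone]
    rw [hstep, List.foldl_append, ih]
    have ht : (((n + 1 : Nat) : Int) - 1).toNat = n := by omega
    have ht : (((n + 1 : Nat) : Int) - 1).toNat = n := by omega
    simp only [ht, shortSum, tight_replicate_succ]
    apply Prod.ext <;> simp <;> ring

-- ===== VERDICT (by name: the statement is the Claim_ definition above) =====
theorem f_spec : Claim_equal_f := by
  intro N D b _ _
  unfold Spec_f f
  cases b with
  | false =>
    simp only [f_alt, Bool.not_false, if_true, PySem.List.len_eq]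
    rw [foldB_rev, fA_false_eq]
  | true =>
    simp only [f_alt, Bool.not_true, PySem.List.len_eq, Bool.false_eq_true, if_false]
    rw [foldB_rev]
    cases hN : N.toList with
    | nil => simp [fA]
    | cons c cs =>
      simp only [List.length_cons, Nat.succ_ne_zero, if_false]
      rw [foldB_range D (tight D (c :: cs)) cs.length]
      rw [fA_true_eq _ _ (by simp), fA_nines]
      simp
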